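-- pv_equiv track=rewrite | github.com/seanchatmangpt/AutoGPT | autogpts/test_agent/forge/sdk/benchmarks/matrix_overnight/import_libraries_generate_crud_codepy_2023-10-25_17-02-41.py | generate_crud_code
-- ===== SOURCE A (Python) =====
-- def generate_crud_code(database):
--     # Create lists to store CRUD code
--     create_code = []
--     read_code = []
--     update_code = []
--     delete_code = []
--
--     # Iterate over the database schema
--     for table in database:
--         # Generate create code
--         create_code.append(f"def create_{table}(data):\n    # code to insert data into {table} table\n    pass\n")
--         # Generate read code
--         read_code.append(f"def read_{table}(id):\n    # code to retrieve data from {table} table\n    pass\n")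
--         # Generate update code
--         update_code.append(f"def update_{table}(id, data):\n    # code to update data in {table} table\n    pass\n")
--         # Generate delete code
--         delete_code.append(f"def delete_{table}(id):\n    # code to delete data from {table} table\n    pass\n")
--
--     # Return all CRUD code as a dictionary
--     return {
--         "create": create_code,
--         "read": read_code,
--         "update": update_code,
--         "delete": delete_code
--     }
-- ===== SOURCE B (Python) =====
-- _TEMPLATES = {
--     "create": ("(data)", "insert data into"),
--     "read": ("(id)", "retrieve data from"),
--     "update": ("(id, data)", "update data in"),
--     "delete": ("(id)", "delete data from"),
-- }
--
--
-- def generate_crud_code(database):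
--     return {
--         op: [
--             f"def {op}_{table}{sig}:\n    # code to {verb} {table} table\n    pass\n"
--             for table in database
--         ]
--         for op, (sig, verb) in _TEMPLATES.items()
--     }
-- ===== Notes on version B (the rewrite author's own statement) =====
-- stated objective: simpler
-- what changed: Replaces four parallel accumulator lists filled in one loop over tables by an operation-indexed template map (signature + comment verb per op) and a dict comprehension mapping each operation to a list comprehension over tables, inverting the loop nesting.
import Mathlib
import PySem

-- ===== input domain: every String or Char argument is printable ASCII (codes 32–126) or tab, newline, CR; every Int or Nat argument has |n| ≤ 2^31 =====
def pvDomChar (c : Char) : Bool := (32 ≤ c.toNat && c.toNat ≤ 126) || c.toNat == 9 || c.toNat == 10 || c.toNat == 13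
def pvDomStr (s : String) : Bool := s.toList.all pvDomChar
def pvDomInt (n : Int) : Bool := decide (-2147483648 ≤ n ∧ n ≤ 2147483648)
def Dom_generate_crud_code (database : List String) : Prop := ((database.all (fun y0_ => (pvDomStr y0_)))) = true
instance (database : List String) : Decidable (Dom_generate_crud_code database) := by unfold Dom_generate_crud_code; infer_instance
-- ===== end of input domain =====

-- B replaces A's four parallel lists filled in one loop by an operation-indexed template map and a comprehension per operation (objective: simpler).

-- ===== PORT A =====
-- one loop over tables appending to four accumulator lists, then a dict literal
def generate_crud_code (database : List String) : List (String × List String) :=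
  let acc := database.foldl
    (fun (acc : List String × List String × List String × List String) table =>
      let (c, r, u, d) := acc
      (c ++ ["def create_" ++ table ++ "(data):\n    # code to insert data into " ++ table ++ " table\n    pass\n"],
       r ++ ["def read_" ++ table ++ "(id):\n    # code to retrieve data from " ++ table ++ " table\n    pass\n"],
       u ++ ["def update_" ++ table ++ "(id, data):\n    # code to update data in " ++ table ++ " table\n    pass\n"],
       d ++ ["def delete_" ++ table ++ "(id):\n    # code to delete data from " ++ table ++ " table\n    pass\n"]))
    ([], [], [], [])
  [("create", acc.1), ("read", acc.2.1), ("update", acc.2.2.1), ("delete", acc.2.2.2)]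

-- ===== PORT B =====
def crudTemplates : List (String × String × String) :=
  [("create", "(data)", "insert data into"),
   ("read", "(id)", "retrieve data from"),
   ("update", "(id, data)", "update data in"),
   ("delete", "(id)", "delete data from")]

-- dict comprehension over the template map; inner list comprehension over tables
def generate_crud_code_alt (database : List String) : List (String × List String) :=
  crudTemplates.map (fun t =>
    let (op, sig, verb) := t
    (op, database.map (fun table =>
      "def " ++ op ++ "_" ++ table ++ sig ++ ":\n    # code to " ++ verb ++ " " ++ table ++ " table\n    pass\n")))

-- ===== PRECONDITION & SPEC =====
def Spec_generate_crud_code (database : List String) (out : List (String × List String)) : Prop := out = generate_crud_code_alt database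
instance (database : List String) (out : List (String × List String)) : Decidable (Spec_generate_crud_code database out) := by unfold Spec_generate_crud_code; infer_instance

-- ===== CLAIM (what is proved, stated in full; the proofs are below) =====
def Claim_equal_generate_crud_code : Prop := ∀ (database : List String), Dom_generate_crud_code database → Spec_generate_crud_code database (generate_crud_code database)

-- ===== LEMMAS AND PROOFS =====

-- characterise A's fold: starting from any accumulator it appends one map per component
theorem crud_foldl_eq (database : List String)
    (c r u d : List String) :
    database.foldl
      (fun (acc : List String × List String × List String × List String) table =>
        let (c, r, u, d) := acc
        (c ++ ["def create_" ++ table ++ "(data):\n    # code to insert data into " ++ table ++ " table\n    pass\n"],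
         r ++ ["def read_" ++ table ++ "(id):\n    # code to retrieve data from " ++ table ++ " table\n    pass\n"],
         u ++ ["def update_" ++ table ++ "(id, data):\n    # code to update data in " ++ table ++ " table\n    pass\n"],
         d ++ ["def delete_" ++ table ++ "(id):\n    # code to delete data from " ++ table ++ " table\n    pass\n"]))
      (c, r, u, d)
    = (c ++ database.map (fun table => "def create_" ++ table ++ "(data):\n    # code to insert data into " ++ table ++ " table\n    pass\n"),
       r ++ database.map (fun table => "def read_" ++ table ++ "(id):\n    # code to retrieve data from " ++ table ++ " table\n    pass\n"),
       u ++ database.map (fun table => "def update_" ++ table ++ "(id, data):\n    # code to update data in " ++ table ++ " table\n    pass\n"),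
       d ++ database.map (fun table => "def delete_" ++ table ++ "(id):\n    # code to delete data from " ++ table ++ " table\n    pass\n")) := by
  induction database generalizing c r u d with
  | nil => simp
  | cons t ts ih => simp [List.foldl, ih]

-- ===== VERDICT (by name: the statement is the Claim_ definition above) =====
theorem generate_crud_code_spec : Claim_equal_generate_crud_code := by
  intro database _
  unfold Spec_generate_crud_code generate_crud_code generate_crud_code_alt crudTemplates
  rw [crud_foldl_eq]
  simp only [List.nil_append, List.map_cons, List.map_nil, List.cons.injEq,
    Prod.mk.injEq, true_and, and_true, List.map_inj_left]
  refine ⟨?_, ?_, ?_, ?_⟩ <;> · intro a _; obtain ⟨l⟩ := a; simp [String.ext_iff]
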